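-- pv_equiv track=rewrite | github.com/adonlic/Area45_RaspberryPi | shared/utils/validator.py | is_file_size
-- ===== SOURCE A (Python) =====
-- def is_not_empty(value):
--     if value != '':
--         return True, None
--
--     return False, "Missing value"
--
-- def is_file_size(value):
--     ok, message = is_not_empty(value)
--     is_unit = False
--     first_unit_letter = ''
--     is_done = False
--
--     if ok:
--         for v in value:
--             # check if value has too many characters (characters after unit declaration)
--             # example: 500kbb, 500bmb etc.
--             if is_done:
--                 return False, "Invalid value (too many characters after declaring unit)"
--             # if not case sensitive, size unit have big and/or small chars
--             v = v.lower()
--             if not is_unit and '0' <= v <= '9':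
--                 continue
--             elif not is_unit and v == 'b':
--                 # expecting end
--                 is_unit = True
--                 is_done = True
--                 continue
--             elif not is_unit and v in ['k', 'm']:
--                 # expecting 'b' letter so it can be kb or mb...
--                 is_unit = True
--                 first_unit_letter = v
--                 continue
--             elif is_unit and first_unit_letter in ['k', 'm'] and v == 'b':
--                 # if function is on unit part and it expects to be 'kb' or 'mb', it's
--                 # supposed to be end of value...
--                 is_done = True
--                 continue
--             else:
--                 # if value parsing was wrong...
--                 return False, "Must be value with format <integer><unit> where unit can" \
--                               "be in bytes, kilobytes or megabytes (b, kb, mb)"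
--         if is_done:
--             return True, None
--         # function will go here if there's only integer part
--         return False, "Missing unit declaration (b, kb, mb)"
--
--     return False, message
-- ===== SOURCE B (Python) =====
-- def is_file_size(value):
--     if value == '':
--         return False, "Missing value"
--     i = 0
--     while i < len(value) and '0' <= value[i] <= '9':
--         i += 1
--     rest = value[i:].lower()
--     if rest == '':
--         return False, "Missing unit declaration (b, kb, mb)"
--     if rest[0] == 'b':
--         if len(rest) == 1:
--             return True, None
--         return False, "Invalid value (too many characters after declaring unit)"
--     if rest[0] in ('k', 'm'):
--         if len(rest) == 1:
--             return False, "Missing unit declaration (b, kb, mb)"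
--         if rest[1] == 'b':
--             if len(rest) == 2:
--                 return True, None
--             return False, "Invalid value (too many characters after declaring unit)"
--     return False, "Must be value with format <integer><unit> where unit can" \
--                   "be in bytes, kilobytes or megabytes (b, kb, mb)"
-- ===== Notes on version B (the rewrite author's own statement) =====
-- stated objective: alternative
-- what changed: Replaces A's single character loop with is_unit/first_unit_letter/is_done flags by stripping the leading digit run and branching once on the lowercased remainder ('', 'b...', 'kb...'/'mb...', other).
import Mathlib
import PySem

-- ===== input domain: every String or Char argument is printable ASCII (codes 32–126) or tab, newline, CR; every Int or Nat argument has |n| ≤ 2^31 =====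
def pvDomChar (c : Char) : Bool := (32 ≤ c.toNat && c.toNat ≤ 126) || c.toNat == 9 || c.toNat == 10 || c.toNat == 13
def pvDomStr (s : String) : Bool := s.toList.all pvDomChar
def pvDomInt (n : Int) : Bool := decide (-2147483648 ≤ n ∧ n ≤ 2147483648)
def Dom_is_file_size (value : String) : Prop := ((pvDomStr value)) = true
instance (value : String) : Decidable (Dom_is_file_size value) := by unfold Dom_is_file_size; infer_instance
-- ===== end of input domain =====

-- B re-decomposes A's flag-driven loop: it strips the leading digit run, then branches
-- directly on the lowercased remainder ('alternative' objective, same cost, no speed claim).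

-- ===== PORT A =====
def is_not_empty (value : String) : Bool × Option String :=
  if value ≠ "" then (true, none) else (false, some "Missing value")

def isFileSizeLoop : List Char → Bool → String → Bool → Bool × Option String
  | [], _, _, is_done =>
      if is_done then (true, none)
      else (false, some "Missing unit declaration (b, kb, mb)")
  | c :: rest, is_unit, first_unit_letter, is_done =>
      if is_done then
        (false, some "Invalid value (too many characters after declaring unit)")
      else
        let v := PySem.Chars.lowerChar c
        if !is_unit && (decide ('0' ≤ v) && decide (v ≤ '9')) then
          isFileSizeLoop rest is_unit first_unit_letter is_done
        else if !is_unit && (v == 'b') then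
          isFileSizeLoop rest true first_unit_letter true
        else if !is_unit && (v == 'k' || v == 'm') then
          isFileSizeLoop rest true (String.ofList [v]) is_done
        else if is_unit && (first_unit_letter == "k" || first_unit_letter == "m") && (v == 'b') then
          isFileSizeLoop rest is_unit first_unit_letter true
        else
          (false, some "Must be value with format <integer><unit> where unit canbe in bytes, kilobytes or megabytes (b, kb, mb)")

def is_file_size (value : String) : Bool × Option String :=
  let om := is_not_empty value
  if om.1 then isFileSizeLoop value.toList false "" false
  else (false, om.2)

-- ===== PORT B =====
def is_file_size_alt (value : String) : Bool × Option String :=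
  if value == "" then (false, some "Missing value")
  else
    match PySem.Chars.lower (value.toList.dropWhile (fun c => decide ('0' ≤ c) && decide (c ≤ '9'))) with
    | [] => (false, some "Missing unit declaration (b, kb, mb)")
    | c :: t =>
      if c == 'b' then
        if t = [] then (true, none)
        else (false, some "Invalid value (too many characters after declaring unit)")
      else if c == 'k' || c == 'm' then
        match t with
        | [] => (false, some "Missing unit declaration (b, kb, mb)")
        | c2 :: t2 =>
          if c2 == 'b' then
            if t2 = [] then (true, none)
            else (false, some "Invalid value (too many characters after declaring unit)")
          else (false, some "Must be value with format <integer><unit> where unit canbe in bytes, kilobytes or megabytes (b, kb, mb)")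
      else (false, some "Must be value with format <integer><unit> where unit canbe in bytes, kilobytes or megabytes (b, kb, mb)")

-- ===== PRECONDITION & SPEC =====
def Spec_is_file_size (value : String) (out : Bool × Option String) : Prop := out = is_file_size_alt value
instance (value : String) (out : Bool × Option String) : Decidable (Spec_is_file_size value out) := by unfold Spec_is_file_size; infer_instance

-- ===== CLAIM (what is proved, stated in full; the proofs are below) =====
def Claim_equal_is_file_size : Prop := ∀ (value : String), Dom_is_file_size value → Spec_is_file_size value (is_file_size value)

-- ===== LEMMAS AND PROOFS =====

theorem lowerChar_digit (c : Char) :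
    (decide ('0' ≤ PySem.Chars.lowerChar c) && decide (PySem.Chars.lowerChar c ≤ '9'))
      = (decide ('0' ≤ c) && decide (c ≤ '9')) := by
  simp only [PySem.Chars.lowerChar, PySem.Chars.isupper]
  split_ifs with h
  · simp only [Bool.and_eq_true, decide_eq_true_iff, Char.le_def] at h
    obtain ⟨h1, h2⟩ := h
    have h1' : 65 ≤ c.toNat := UInt32.le_iff_toNat_le.mp h1
    have h2' : c.toNat ≤ 90 := UInt32.le_iff_toNat_le.mp h2
    have ht : (Char.ofNat (c.toNat + 32)).toNat = c.toNat + 32 := by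
      have hv : (c.toNat + 32).isValidChar := Or.inl (by omega)
      rw [Char.toNat_ofNat, if_pos hv]
    have lhs : decide (Char.ofNat (c.toNat + 32) ≤ '9') = false := by
      simp only [decide_eq_false_iff_not, Char.le_def]
      intro hle
      have := UInt32.le_iff_toNat_le.mp hle
      change (Char.ofNat (c.toNat + 32)).toNat ≤ ('9':Char).toNat at this
      rw [ht] at this
      have : c.toNat + 32 ≤ 57 := this
      omega
    have rhs : decide (c ≤ '9') = false := by
      simp only [decide_eq_false_iff_not, Char.le_def]
      intro hle
      have := UInt32.le_iff_toNat_le.mp hle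
      have : c.toNat ≤ 57 := this
      omega
    simp [lhs, rhs]
  · rfl

theorem lower_eq_nil {t : List Char} : PySem.Chars.lower t = [] ↔ t = [] := by
  simp [PySem.Chars.lower]

theorem loop_done (t : List Char) (u : Bool) (f : String) :
    isFileSizeLoop t u f true =
      (if t = [] then (true, none)
       else (false, some "Invalid value (too many characters after declaring unit)")) := by
  cases t <;> simp [isFileSizeLoop]

theorem loop_km (t : List Char) (f : String) (hf : f = "k" ∨ f = "m") :
    isFileSizeLoop t true f false =
      (match PySem.Chars.lower t with
       | [] => (false, some "Missing unit declaration (b, kb, mb)")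
       | c2 :: t2 =>
         if c2 == 'b' then
           if t2 = [] then (true, none)
           else (false, some "Invalid value (too many characters after declaring unit)")
         else (false, some "Must be value with format <integer><unit> where unit canbe in bytes, kilobytes or megabytes (b, kb, mb)")) := by
  cases t with
  | nil => simp [isFileSizeLoop, PySem.Chars.lower]
  | cons c t =>
    have hfk : (f == "k" || f == "m") = true := by
      rcases hf with h | h <;> simp [h]
    by_cases hb : PySem.Chars.lowerChar c = 'b'
    · simp [isFileSizeLoop, hfk, hb, loop_done, PySem.Chars.lower]
    · simp [isFileSizeLoop, hfk, hb, PySem.Chars.lower]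

theorem loop_main (L : List Char) :
    isFileSizeLoop L false "" false =
      (match PySem.Chars.lower (L.dropWhile (fun c => decide ('0' ≤ c) && decide (c ≤ '9'))) with
       | [] => (false, some "Missing unit declaration (b, kb, mb)")
       | c :: t =>
         if c == 'b' then
           if t = [] then (true, none)
           else (false, some "Invalid value (too many characters after declaring unit)")
         else if c == 'k' || c == 'm' then
           match t with
           | [] => (false, some "Missing unit declaration (b, kb, mb)")
           | c2 :: t2 =>
             if c2 == 'b' then
               if t2 = [] then (true, none)
               else (false, some "Invalid value (too many characters after declaring unit)")
             else (false, some "Must be value with format <integer><unit> where unit canbe in bytes, kilobytes or megabytes (b, kb, mb)")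
         else (false, some "Must be value with format <integer><unit> where unit canbe in bytes, kilobytes or megabytes (b, kb, mb)")) := by
  induction L with
  | nil => simp [isFileSizeLoop, PySem.Chars.lower]
  | cons c L ih =>
    by_cases hd : (decide ('0' ≤ c) && decide (c ≤ '9')) = true
    · have hld := lowerChar_digit c
      rw [hd] at hld
      simp [isFileSizeLoop, hld, List.dropWhile, hd, ih]
    · rw [Bool.not_eq_true] at hd
      have hld := lowerChar_digit c
      rw [hd] at hld
      have hdw : List.dropWhile (fun c => decide ('0' ≤ c) && decide (c ≤ '9')) (c :: L)
          = c :: L := by simp [hd]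
      rw [hdw]
      by_cases hb : PySem.Chars.lowerChar c = 'b'
      · simp [isFileSizeLoop, hb, loop_done, lower_eq_nil, PySem.Chars.lower]
      · by_cases hk : PySem.Chars.lowerChar c = 'k'
        · have hkm := loop_km L (String.ofList ['k']) (Or.inl rfl)
          simp [isFileSizeLoop, hk, hkm, PySem.Chars.lower]
        · by_cases hm : PySem.Chars.lowerChar c = 'm'
          · have hkm := loop_km L (String.ofList ['m']) (Or.inr rfl)
            simp [isFileSizeLoop, hb, hk, hm, hkm, PySem.Chars.lower]
          · simp [isFileSizeLoop, hld, hb, hk, hm, PySem.Chars.lower]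

-- ===== VERDICT (by name: the statement is the Claim_ definition above) =====
theorem is_file_size_spec : Claim_equal_is_file_size := by
  intro value _
  unfold Spec_is_file_size is_file_size is_file_size_alt is_not_empty
  by_cases h : value = ""
  · simp [h]
  · simp [h, loop_main]
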